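-- pv_equiv track=rewrite | github.com/pypi-data/pypi-mirror-400 | packages/python-oscquery/python_oscquery-0.3.0-py3-none-any.whl/pythonoscquery/shared/osc_spec.py | is_valid_path
-- ===== SOURCE A (Python) =====
-- disallowed_path_chars = (
--     " ",
--     "#",
--     "*",
--     ",",
--     "?",
--     "[",
--     "]",
--     "{",
--     "}",
-- )
--
-- def is_valid_path(path: str) -> bool:
--     """Check:
--      - if path begins with /
--      - if path contains empty nodes
--      - if path contains characters that are not allowed by the OSC specification.
--     Won't check for forward slash '/', since this will be used to split the path into containers and methods"""
--
--     if not path.startswith("/"):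
--         return False
--
--     if any([x in path for x in disallowed_path_chars]):
--         return False
--
--     path = path[1:]  # strip leading /
--
--     if path != "" and "" in path.split("/"):
--         return False
--
--     return True
-- ===== SOURCE B (Python) =====
-- disallowed_path_chars = (
--     " ",
--     "#",
--     "*",
--     ",",
--     "?",
--     "[",
--     "]",
--     "{",
--     "}",
-- )
--
-- _bad = set(disallowed_path_chars)
--
-- def is_valid_path(path: str) -> bool:
--     if not path.startswith("/"):
--         return False
--     n = len(path)
--     prev = ""
--     for i, c in enumerate(path):
--         if c in _bad:
--             return False
--         if c == "/" and i > 0 and (prev == "/" or i == n - 1):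
--             return False
--         prev = c
--     return True
-- ===== Notes on version B (the rewrite author's own statement) =====
-- stated objective: alternative
-- what changed: Replaces the tuple-of-substring-membership any() scan plus split('/')-then-'' -membership empty-node check with one combined left-to-right scan over enumerate(path) that rejects disallowed characters and adjacent/trailing slashes inline, keeping no intermediate list.
import Mathlib
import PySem

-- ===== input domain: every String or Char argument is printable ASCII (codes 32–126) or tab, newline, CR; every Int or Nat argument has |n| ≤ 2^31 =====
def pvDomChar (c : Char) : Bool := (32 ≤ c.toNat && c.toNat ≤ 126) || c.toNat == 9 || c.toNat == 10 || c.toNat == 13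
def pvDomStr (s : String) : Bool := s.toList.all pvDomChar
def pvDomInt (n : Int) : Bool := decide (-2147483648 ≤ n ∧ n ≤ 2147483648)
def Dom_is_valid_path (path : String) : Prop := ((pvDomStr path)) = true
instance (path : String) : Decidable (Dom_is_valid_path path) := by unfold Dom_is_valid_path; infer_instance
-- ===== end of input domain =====

set_option maxRecDepth 4096

-- B replaces A's tuple-membership any() scan plus split('/')-based empty-node check by a
-- single combined scan that rejects disallowed chars and adjacent/trailing slashes inline.

-- ===== PORT A =====
def disallowed_path_chars : List (List Char) :=
  [[' '], ['#'], ['*'], [','], ['?'], ['['], [']'], ['{'], ['}']]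

def is_valid_path (path : String) : Bool :=
  if !(PySem.Str.startswith path "/") then false
  else if (disallowed_path_chars.map (fun x => PySem.Chars.isIn x path.toList)).any id then false
  else
    let p := PySem.Chars.slice path.toList (some 1) none
    if p ≠ [] ∧ [] ∈ PySem.Chars.splitOn p ['/'] then false
    else true

-- ===== PORT B =====
def pvBad : List Char := [' ', '#', '*', ',', '?', '[', ']', '{', '}']

def pvScan (n : Nat) : List Char → Nat → Option Char → Bool
  | [], _, _ => true
  | c :: rest, i, prev =>
    if c ∈ pvBad then false
    else if c = '/' ∧ 0 < i ∧ (prev = some '/' ∨ i = n - 1) then false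
    else pvScan n rest (i + 1) (some c)

def is_valid_path_alt (path : String) : Bool :=
  if !(PySem.Str.startswith path "/") then false
  else pvScan path.toList.length path.toList 0 none

-- ===== PRECONDITION & SPEC =====
def Spec_is_valid_path (path : String) (out : Bool) : Prop := out = is_valid_path_alt path
instance (path : String) (out : Bool) : Decidable (Spec_is_valid_path path out) := by unfold Spec_is_valid_path; infer_instance

-- ===== CLAIM (what is proved, stated in full; the proofs are below) =====
def Claim_equal_is_valid_path : Prop := ∀ (path : String), Dom_is_valid_path path → Spec_is_valid_path path (is_valid_path path)

-- ===== LEMMAS AND PROOFS =====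

-- simple recursive model of s.split('/')
def pvSos : List Char → List Char → List (List Char)
  | [], cur => [cur.reverse]
  | c :: rest, cur => if c = '/' then cur.reverse :: pvSos rest [] else pvSos rest (c :: cur)

-- "the split contains an empty piece", with b = current piece empty so far
def pvHasEmpty : List Char → Bool → Bool
  | [], b => b
  | c :: rest, b => if c = '/' then b || pvHasEmpty rest true else pvHasEmpty rest false

-- B's slash-violation predicate, with b = previous char was '/'
def pvViol : List Char → Bool → Bool
  | [], _ => false
  | c :: rest, b => if c = '/' then b || rest.isEmpty || pvViol rest true else pvViol rest false

lemma pvGo_eq_sos (fuel : Nat) : ∀ (l cur : List Char) (acc : List (List Char)),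
    l.length < fuel →
    PySem.Chars.splitOn.go ['/'] fuel l cur acc = acc.reverse ++ pvSos l cur := by
  induction fuel with
  | zero => intro l cur acc h; omega
  | succ fuel ih =>
    intro l cur acc h
    cases l with
    | nil => simp [PySem.Chars.splitOn.go, pvSos]
    | cons c rest =>
      by_cases hc : c = '/'
      · subst hc
        rw [PySem.Chars.splitOn.go]
        simp [List.isPrefixOf, pvSos, ih rest [] _ (by simpa using h)]
      · rw [PySem.Chars.splitOn.go]
        simp [List.isPrefixOf, hc, Ne.symm hc, pvSos,
          ih rest (c :: cur) acc (by simpa using h)]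

lemma pvSplitOn_eq (l : List Char) : PySem.Chars.splitOn l ['/'] = pvSos l [] := by
  rw [PySem.Chars.splitOn, pvGo_eq_sos (l.length + 1) l [] [] (by omega)]
  simp

lemma pvMem_sos (l : List Char) : ∀ cur, ([] ∈ pvSos l cur) ↔ pvHasEmpty l cur.isEmpty = true := by
  induction l with
  | nil => intro cur; cases cur <;> simp [pvSos, pvHasEmpty]
  | cons c rest ih =>
    intro cur
    by_cases hc : c = '/'
    · subst hc
      have h1 : pvSos ('/' :: rest) cur = cur.reverse :: pvSos rest [] := by simp [pvSos]
      have h2 : pvHasEmpty ('/' :: rest) cur.isEmpty = (cur.isEmpty || pvHasEmpty rest true) := by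
        simp [pvHasEmpty]
      rw [h1, h2]
      cases cur <;> simp [ih]
    · have h1 : pvSos (c :: rest) cur = pvSos rest (c :: cur) := by simp [pvSos, hc]
      have h2 : pvHasEmpty (c :: rest) cur.isEmpty = pvHasEmpty rest false := by
        simp [pvHasEmpty, hc]
      rw [h1, h2, ih]
      simp

lemma pvViol_eq (l : List Char) : ∀ b, pvViol l b = (!l.isEmpty && pvHasEmpty l b) := by
  induction l with
  | nil => intro b; simp [pvViol]
  | cons c rest ih =>
    intro b
    by_cases hc : c = '/'
    · subst hc
      have h1 : pvViol ('/' :: rest) b = (b || rest.isEmpty || pvViol rest true) := by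
        conv_lhs => rw [pvViol]
        simp
      have h2 : pvHasEmpty ('/' :: rest) b = (b || pvHasEmpty rest true) := by
        conv_lhs => rw [pvHasEmpty]
        simp
      rw [h1, h2, ih]
      cases rest <;> simp [pvHasEmpty]
    · have h1 : pvViol (c :: rest) b = pvViol rest false := by
        conv_lhs => rw [pvViol]
        simp [hc]
      have h2 : pvHasEmpty (c :: rest) b = pvHasEmpty rest false := by
        conv_lhs => rw [pvHasEmpty]
        simp [hc]
      rw [h1, h2, ih]
      cases rest <;> simp [pvHasEmpty]

lemma pvScan_spec (n : Nat) (t : List Char) : ∀ (i : Nat) (prev : Option Char),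
    1 ≤ i → i + t.length = n →
    pvScan n t i prev = (!t.any (· ∈ pvBad) && !pvViol t (prev == some '/')) := by
  induction t with
  | nil => intro i prev _ _; simp [pvScan, pvViol]
  | cons c rest ih =>
    intro i prev hi hn
    have hstep : pvScan n (c :: rest) i prev =
        (if c ∈ pvBad then false
         else if c = '/' ∧ 0 < i ∧ (prev = some '/' ∨ i = n - 1) then false
         else pvScan n rest (i + 1) (some c)) := rfl
    rw [hstep]
    by_cases hb : c ∈ pvBad
    · simp [hb]
    · by_cases hc : c = '/'
      · subst hc
        have hlast : (i = n - 1) ↔ rest.isEmpty = true := by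
          cases rest <;> simp at hn ⊢ <;> omega
        by_cases hg : prev = some '/' ∨ i = n - 1
        · have hv : pvViol ('/' :: rest) (prev == some '/') = true := by
            conv_lhs => rw [pvViol]
            rcases hg with h | h
            · simp [h]
            · simp [hlast.mp h]
          simp [hb, hv, hg]
          intro h0
          exact absurd h0 (by omega)
        · push_neg at hg
          have hv : pvViol ('/' :: rest) (prev == some '/') = pvViol rest true := by
            conv_lhs => rw [pvViol]
            simp [hg.1, (by simpa [hlast] using hg.2 : rest.isEmpty = false)]
          rw [if_neg hb, if_neg (by push_neg; intro _ _; exact hg)]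
          rw [ih (i+1) (some '/') (by omega) (by simp at hn ⊢; omega)]
          simp [hb, hv]
      · have hv : pvViol (c :: rest) (prev == some '/') = pvViol rest false := by
          conv_lhs => rw [pvViol]
          simp [hc]
        rw [if_neg hb, if_neg (by simp [hc])]
        rw [ih (i+1) (some c) (by omega) (by simp at hn ⊢; omega)]
        have hcc : (some c == some ('/' : Char)) = false := by simp [hc]
        rw [hcc, hv]
        simp [hb]

lemma pvIsIn_single (c : Char) (s : List Char) : PySem.Chars.isIn [c] s = s.contains c := by
  rw [Bool.eq_iff_iff, PySem.Chars.isIn_iff_infix, List.contains_iff_mem]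
  constructor
  · intro h; exact h.mem (by simp)
  · intro h
    obtain ⟨l1, l2, rfl⟩ := List.mem_iff_append.mp h
    exact ⟨l1, l2, by simp⟩

lemma pvAnyA (s : List Char) :
    (disallowed_path_chars.map (fun x => PySem.Chars.isIn x s)).any id = s.any (· ∈ pvBad) := by
  rw [Bool.eq_iff_iff]
  simp only [disallowed_path_chars, pvBad, List.map_cons, List.map_nil, List.any_cons,
    List.any_nil, pvIsIn_single, Bool.or_eq_true, id_eq, List.any_eq_true,
    List.contains_iff_mem, List.mem_cons, List.not_mem_nil, or_false, decide_eq_true_eq]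
  aesop

lemma pvMain (s : List Char) :
    (if !(PySem.Chars.startswith s "/".toList) then false
     else if (disallowed_path_chars.map (fun x => PySem.Chars.isIn x s)).any id then false
     else if PySem.Chars.slice s (some 1) none ≠ [] ∧
         [] ∈ PySem.Chars.splitOn (PySem.Chars.slice s (some 1) none) ['/'] then false
     else true)
    = (if !(PySem.Chars.startswith s "/".toList) then false
       else pvScan s.length s 0 none) := by
  have h0 : ("/" : String).toList = ['/'] := by decide
  rw [h0]
  cases s with
  | nil => decide
  | cons c t =>
    by_cases hc : c = '/'
    · subst hc
      have hsw : PySem.Chars.startswith ('/' :: t) ['/'] = true := by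
        rw [PySem.Chars.startswith_iff]
        simp
      rw [hsw]
      simp only [Bool.not_true, Bool.false_eq_true, if_false]
      rw [pvAnyA]
      have hany : (('/' :: t).any (· ∈ pvBad)) = t.any (· ∈ pvBad) := by
        simp [pvBad]
      rw [hany]
      have hsl : PySem.Chars.slice ('/' :: t) (some 1) none = t := by
        simp [PySem.Chars.slice_eq_listSlice, PySem.List.slice_from_one]
      rw [hsl]
      have hB : pvScan ('/' :: t).length ('/' :: t) 0 none
          = pvScan ('/' :: t).length t 1 (some '/') := by
        conv_lhs => rw [pvScan]
        simp [pvBad]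
      rw [hB, pvScan_spec ('/' :: t).length t 1 (some '/') (by omega) (by simp [Nat.add_comm])]
      rw [pvSplitOn_eq]
      by_cases ha : t.any (· ∈ pvBad) = true
      · simp [ha]
      · have ha' : t.any (· ∈ pvBad) = false := by simpa using ha
        rw [ha']
        have hbeq : (some ('/' : Char) == some '/') = true := by decide
        rw [hbeq, pvViol_eq]
        by_cases ht : t = []
        · subst ht; simp [pvSos]
        · have hne : t.isEmpty = false := by simpa [List.isEmpty_iff] using ht
          by_cases he : pvHasEmpty t true = true
          · simp [ht, (pvMem_sos t []).mpr (by simpa using he), hne, he]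
          · have he' : pvHasEmpty t true = false := by simpa using he
            have hmem : ¬ ([] ∈ pvSos t []) := by
              rw [pvMem_sos t []]
              simp [he']
            simp [ht, hmem, hne, he']
    · have hsw : PySem.Chars.startswith (c :: t) ['/'] = false := by
        rw [Bool.eq_false_iff, Ne, PySem.Chars.startswith_iff]
        simp [List.cons_prefix_cons, Ne.symm hc]
      rw [hsw]
      simp

-- ===== VERDICT (by name: the statement is the Claim_ definition above) =====
theorem is_valid_path_spec : Claim_equal_is_valid_path := by
  intro path _
  unfold Spec_is_valid_path is_valid_path is_valid_path_alt
  simp only [PySem.Str.startswith_eq]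
  exact pvMain path.toList
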